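-- pv_equiv track=rewrite | github.com/jalejandro555/Hello_World | 5thpooint.py | filter_anagrams
-- ===== SOURCE A (Python) =====
-- def filter_anagrams(lista):
--     # Create an empty dictionary called 'anagrams' to store anagram words
--     anagrams = {}
--     # Create an empty set to store non-anagram words
--     non_anagrams = set()
--
--     for word in lista:
--         # Generate a unique 'code' for each word by sorting its characters alphabetically
--         code = "".join(sorted(word))
--
--         # Check if the code is already in the 'anagrams' dictionary
--         if code in anagrams:
--             anagrams[code].append(word)
--             """"
--              If the code already exists, we add the word to the corresponding list
--              in the anagram dictionary. If it does not exist,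
--              We create a new entry in the dictionary with the word.
--              """
--         else:
--             # If not, create a new entry with the word
--             anagrams[code] = [word]
--
--     # Iterate over the entries in the 'anagrams' dictionary
--     for code, words in anagrams.items():
--         # If there are more than one word with the same code, add them to the non-anagrams set
--         if len(words) > 1:
--             """
--              If there is more than one word associated with the same code
--              (that is, they are anagrams), we add them
--              to the set no_anagrams.
--              """
--             non_anagrams.update(words)
--
--     # Convert the non-anagrams set back to a list
--     return list(non_anagrams)
-- ===== SOURCE B (Python) =====
-- def filter_anagrams(lista):
--     # Repeated-partition algorithm: no dict of groups; peel off one signature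
--     # class at a time from a precomputed (signature, word) list.
--     non_anagrams = set()
--     pending = [("".join(sorted(w)), w) for w in lista]
--     while pending:
--         code = pending[0][0]
--         group = [w for c, w in pending if c == code]
--         pending = [(c, w) for c, w in pending if c != code]
--         if len(group) > 1:
--             non_anagrams.update(group)
--     return list(non_anagrams)
-- ===== Notes on version B (the rewrite author's own statement) =====
-- stated objective: alternative
-- what changed: Replaces the dict-of-lists grouping plus a second pass over dict items by a dict-free repeated-partition loop: precompute (signature, word) pairs once, then repeatedly peel off the whole anagram class of the first remaining pair and collect classes of size > 1 into the result set.
import Mathlib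
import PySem

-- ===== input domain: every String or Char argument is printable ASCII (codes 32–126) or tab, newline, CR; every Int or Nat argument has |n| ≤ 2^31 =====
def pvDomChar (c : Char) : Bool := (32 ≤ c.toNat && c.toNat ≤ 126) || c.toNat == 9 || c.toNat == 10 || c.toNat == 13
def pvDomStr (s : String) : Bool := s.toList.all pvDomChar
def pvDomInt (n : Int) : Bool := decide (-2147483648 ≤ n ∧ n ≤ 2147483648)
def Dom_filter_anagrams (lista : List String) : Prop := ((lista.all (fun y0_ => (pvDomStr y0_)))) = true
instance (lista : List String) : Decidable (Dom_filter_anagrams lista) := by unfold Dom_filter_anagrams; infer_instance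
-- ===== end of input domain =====

-- B replaces the dict-of-lists grouping by a dict-free repeated partition of a (signature, word)
-- pair list; same return value (a set of words, listed once each), alternative structure.
-- Both Pythons return list(set(...)): the proved equality is about the set's insertion-order model.

-- ===== PORT A =====
-- "".join(sorted(word)) (shared by both Pythons)
def pySig (w : String) : String := String.ofList (PySem.List.sorted w.toList (fun c => c) false)

def filter_anagrams (lista : List String) : List String :=
  let anagrams := lista.foldl (fun d word =>
      let code := pySig word
      if d.contains code then d.insert code (d.getD code [] ++ [word])
      else d.insert code [word]) PySem.Dict.empty
  anagrams.items.foldl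
    (fun s p => if 1 < p.2.length then PySem.Set.update s p.2 else s)
    PySem.Set.empty

-- ===== PORT B =====
-- the while loop of Source B: peel off the first pair's whole signature class, keep the rest
def faGo : List (String × String) → PySem.Set String → PySem.Set String
  | [], s => s
  | (c, w) :: t, s =>
      let group := (List.filter (fun p => p.1 == c) ((c, w) :: t)).map Prod.snd
      let pending := List.filter (fun p => p.1 != c) ((c, w) :: t)
      faGo pending (if 1 < group.length then PySem.Set.update s group else s)
  termination_by l _ => l.length
  decreasing_by
    simp only [List.filter_cons, bne_self_eq_false, Bool.false_eq_true, if_false,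
      List.length_cons]
    exact Nat.lt_succ_of_le (List.length_filter_le _ _)

def filter_anagrams_alt (lista : List String) : List String :=
  faGo (lista.map (fun w => (pySig w, w))) PySem.Set.empty

-- ===== PRECONDITION & SPEC =====
def Spec_filter_anagrams (lista : List String) (out : List String) : Prop := out = filter_anagrams_alt lista
instance (lista : List String) (out : List String) : Decidable (Spec_filter_anagrams lista out) := by unfold Spec_filter_anagrams; infer_instance

-- ===== CLAIM (what is proved, stated in full; the proofs are below) =====
def Claim_equal_filter_anagrams : Prop := ∀ (lista : List String), Dom_filter_anagrams lista → Spec_filter_anagrams lista (filter_anagrams lista)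

-- ===== LEMMAS AND PROOFS =====

-- the group sequence B's recursion peels off, as data
def faG : List (String × String) → List (String × List String)
  | [] => []
  | (c, w) :: t =>
      (c, (List.filter (fun p => p.1 == c) ((c, w) :: t)).map Prod.snd) ::
        faG (List.filter (fun p => p.1 != c) ((c, w) :: t))
  termination_by l => l.length
  decreasing_by
    simp only [List.filter_cons, bne_self_eq_false, Bool.false_eq_true, if_false,
      List.length_cons]
    exact Nat.lt_succ_of_le (List.length_filter_le _ _)

theorem faGo_eq_foldl (l : List (String × String)) (s : PySem.Set String) :
    faGo l s = (faG l).foldl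
      (fun s g => if 1 < g.2.length then PySem.Set.update s g.2 else s) s := by
  induction l, s using faGo.induct with
  | case1 s => simp [faGo, faG]
  | case2 c w t s group pending ih =>
      simp only [faGo, faG, List.foldl_cons]
      exact ih

theorem discard_comm {s : PySem.Set String} {a b : String} :
    (s.discard a).discard b = (s.discard b).discard a := by
  simp only [PySem.Set.discard, List.filter_filter]
  apply List.filter_congr
  intro x _
  rw [Bool.and_comm]

theorem discard_discard_self {s : PySem.Set String} {a : String} :
    (s.discard a).discard a = s.discard a := by
  simp [PySem.Set.discard, List.filter_filter]

theorem discard_ofList (c : String) (xs : List String) :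
    (PySem.Set.ofList xs).discard c
      = PySem.Set.ofList (xs.filter (fun y => y != c)) := by
  induction xs with
  | nil => simp [PySem.Set.ofList, PySem.Set.discard]
  | cons x xs ih =>
      rw [PySem.Set.ofList_cons]
      by_cases h : x = c
      · subst h
        have hhead : (PySem.Set.discard (x :: (PySem.Set.ofList xs).discard x) x)
            = ((PySem.Set.ofList xs).discard x).discard x := by
          simp [PySem.Set.discard]
        rw [hhead, discard_discard_self, ih]
        simp
      · have hhead : (PySem.Set.discard (x :: (PySem.Set.ofList xs).discard x) c)
            = x :: ((PySem.Set.ofList xs).discard x).discard c := by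
          simp [PySem.Set.discard, h]
        rw [hhead, discard_comm, ih, List.filter_cons]
        have hx : (x != c) = true := by simp [h]
        rw [hx]
        simp only [if_true, PySem.Set.ofList_cons]

theorem ofList_cons_filter (c : String) (xs : List String) :
    PySem.Set.ofList (c :: xs)
      = c :: PySem.Set.ofList (xs.filter (fun y => y != c)) := by
  rw [PySem.Set.ofList_cons, discard_ofList]

theorem faG_eq (l : List (String × String)) :
    faG l = (PySem.Set.ofList (l.map Prod.fst)).map
      (fun c => (c, (l.filter (fun p => p.1 == c)).map Prod.snd)) := by
  induction l using faG.induct with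
  | case1 => simp [faG, PySem.Set.ofList]
  | case2 c w t ih =>
      have hpend : List.filter (fun p => p.1 != c) ((c, w) :: t)
          = t.filter (fun p => p.1 != c) := by
        simp
      rw [faG, hpend]
      rw [hpend] at ih
      rw [ih]
      have hmapfst : ((c, w) :: t).map Prod.fst = c :: t.map Prod.fst := by simp
      rw [hmapfst, ofList_cons_filter]
      have hfm : (t.map Prod.fst).filter (fun y => y != c)
          = (t.filter (fun p => p.1 != c)).map Prod.fst := by
        rw [List.filter_map]; rfl
      rw [hfm]
      simp only [List.map_cons]
      congr 1
      apply List.map_congr_left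
      intro c' hc'
      have hc'mem : c' ∈ (t.filter (fun p => p.1 != c)).map Prod.fst := by
        have := (PySem.Set.mem_ofList (y := c')
          (xs := (t.filter (fun p => p.1 != c)).map Prod.fst)).mp hc'
        exact this
      have hne : c' ≠ c := by
        rcases List.mem_map.mp hc'mem with ⟨p, hp, rfl⟩
        have := List.of_mem_filter hp
        simpa using this
      have hhead : List.filter (fun p => p.1 == c') ((c, w) :: t)
          = t.filter (fun p => p.1 == c') := by
        simp [Ne.symm hne]
      have hsub : (t.filter (fun p => p.1 != c)).filter (fun p => p.1 == c')
          = t.filter (fun p => p.1 == c') := by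
        rw [List.filter_filter]
        apply List.filter_congr
        intro p _
        by_cases hp : p.1 = c'
        · simp [hp, hne]
        · simp [hp]
      rw [hhead, hsub]

theorem buildA_eq_modify (lista : List String) :
    lista.foldl (fun d word =>
        let code := pySig word
        if d.contains code then d.insert code (d.getD code [] ++ [word])
        else d.insert code [word]) PySem.Dict.empty
      = (lista.map (fun w => (pySig w, w))).foldl
          (fun d p => d.modify p.1 [] (fun v => v ++ [p.2])) PySem.Dict.empty := by
  rw [List.foldl_map]
  apply List.foldl_ext
  intro d w _
  cases h : d.contains (pySig w) with
  | true => simp [h, PySem.Dict.modify]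
  | false => simp [h, PySem.Dict.modify, PySem.Dict.getD_of_not_contains d [] h]

theorem itemsA_eq_faG (lista : List String) :
    (lista.foldl (fun d word =>
        let code := pySig word
        if d.contains code then d.insert code (d.getD code [] ++ [word])
        else d.insert code [word]) PySem.Dict.empty).items
      = faG (lista.map (fun w => (pySig w, w))) := by
  rw [buildA_eq_modify]
  set ps := lista.map (fun w => (pySig w, w)) with hps
  set D := ps.foldl (fun d p => d.modify p.1 [] (fun v => v ++ [p.2]))
    PySem.Dict.empty with hD
  have hnodup : D.keys.Nodup := by
    rw [hD]
    exact PySem.Dict.nodup_keys_foldl_modify_key ps Prod.fst []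
      (fun _ p v => v ++ [p.2]) PySem.Dict.empty (by simp)
  have hkeys : D.keys = PySem.Set.ofList (ps.map Prod.fst) := by
    rw [hD, PySem.Dict.keys_foldl_modify_key ps Prod.fst []
      (fun _ p v => v ++ [p.2]) PySem.Dict.empty]
    simp [PySem.Dict.keys_empty, PySem.Set.update_nil_left]
  have hget : ∀ c, D.getD c [] = (ps.filter (fun p => p.1 == c)).map Prod.snd := by
    intro c
    rw [hD, PySem.Dict.getD_foldl_modify_append ps PySem.Dict.empty c]
    simp
  rw [PySem.Dict.items_eq_map_keys D hnodup [], hkeys, faG_eq]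
  apply List.map_congr_left
  intro c _
  rw [hget c]

theorem filter_anagrams_spec' (lista : List String) :
    filter_anagrams lista = filter_anagrams_alt lista := by
  unfold filter_anagrams filter_anagrams_alt
  rw [faGo_eq_foldl]
  simp only []
  rw [itemsA_eq_faG]

-- ===== VERDICT (by name: the statement is the Claim_ definition above) =====
theorem filter_anagrams_spec : Claim_equal_filter_anagrams := by
  intro lista _
  unfold Spec_filter_anagrams
  exact filter_anagrams_spec' lista
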